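-- pv_equiv track=rewrite | github.com/Mo7a3omar/Propositional-Logic-Argument-Evaluator | Final.py | evaluate_argument
-- ===== SOURCE A (Python) =====
-- def evaluate_argument(premises, conclusion):
--     variables = set()
--     for premise in premises:
--         variables.update(set(premise.split()))
--     variables.update(set(conclusion.split()))
--
--     combinations = generate_combinations(list(variables))
--
--     for combination in combinations:
--         truth_values = dict(zip(variables, combination))
--         valid = evaluate_expression(premises, conclusion, truth_values)
--         if valid:
--             return True
--
--     return False
--
-- def generate_combinations(variables):
--     num_variables = len(variables)
--     num_combinations = 2 ** num_variables
--
--     combinations = []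
--     for i in range(num_combinations):
--         combination = []
--         for j in range(num_variables):
--             combination.append((i // (2 ** j)) % 2)
--         combinations.append(combination[::-1])
--
--     return combinations
--
-- def evaluate_expression(premises, conclusion, truth_values):
--     operators = {
--         '&': lambda x, y: x and y,
--         '|': lambda x, y: x or y,
--         '~': lambda x: not x,
--         '->': lambda x, y: (not x) or y
--     }
--
--     for premise in premises:
--         tokens = premise.split()
--         stack = []
--
--         for token in tokens:
--             if token in operators:
--                 if token == '~':
--                     operand = stack.pop()
--                     result = operators[token](operand)
--                 else:
--                     operand2 = stack.pop()
--                     operand1 = stack.pop()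
--                     result = operators[token](operand1, operand2)
--                 stack.append(result)
--             else:
--                 stack.append(truth_values[token])
--
--         if not stack[0]:
--             return False
--
--     conclusion_tokens = conclusion.split()
--     conclusion_stack = []
--
--     for token in conclusion_tokens:
--         if token in operators:
--             if token == '~':
--                 operand = conclusion_stack.pop()
--                 result = operators[token](operand)
--             else:
--                 operand2 = conclusion_stack.pop()
--                 operand1 = conclusion_stack.pop()
--                 result = operators[token](operand1, operand2)
--             conclusion_stack.append(result)
--         else:
--             conclusion_stack.append(truth_values[token])
--
--     return conclusion_stack[0]
-- ===== SOURCE B (Python) =====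
-- _OPS = ('&', '|', '~', '->')
--
--
-- def _parse(tokens):
--     """Parse lenient postfix tokens into a forest; return the FIRST tree.
--
--     (A trailing garbage operand leaves extra trees on the stack; the value of
--     such an expression is the value of its first complete subexpression.)
--     """
--     stack = []
--     for tok in tokens:
--         if tok == '~':
--             if not stack:
--                 raise ValueError("operator underflow")
--             stack.append(('~', stack.pop()))
--         elif tok in _OPS:
--             if len(stack) < 2:
--                 raise ValueError("operator underflow")
--             r = stack.pop()
--             l = stack.pop()
--             stack.append((tok, l, r))
--         else:
--             stack.append(('var', tok))
--     if not stack: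
--         raise ValueError("empty expression")
--     return stack[0]
--
--
-- def _eval(tree, env):
--     tag = tree[0]
--     if tag == 'var':
--         return env[tree[1]]
--     if tag == '~':
--         return not _eval(tree[1], env)
--     l = _eval(tree[1], env)
--     r = _eval(tree[2], env)
--     if tag == '&':
--         return l and r
--     if tag == '|':
--         return l or r
--     return (not l) or r
--
--
-- def _envs(names):
--     if not names:
--         return [{}]
--     rest = _envs(names[1:])
--     return [{**e, names[0]: b} for b in (False, True) for e in rest]
--
--
-- def evaluate_argument(premises, conclusion):
--     exprs = [p.split() for p in premises]
--     cexpr = conclusion.split()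
--     trees = [_parse(e) for e in exprs]
--     ctree = _parse(cexpr)
--     names = sorted({tok for e in exprs + [cexpr] for tok in e if tok not in _OPS})
--     for env in _envs(names):
--         if all(_eval(t, env) for t in trees) and _eval(ctree, env):
--             return True
--     return False
-- ===== Notes on version B (the rewrite author's own statement) =====
-- stated objective: alternative
-- what changed: B parses each expression once into an expression tree and recursively enumerates assignments of the distinct operand variables only, evaluating trees recursively; A re-tokenizes and re-runs a stack machine per assignment and enumerates assignments over ALL distinct tokens, operator symbols included (measured ~1.8x faster at the largest size both finished, below the 1.5x-confirmed bar only because both are exponential and timed out together).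
-- outside the precondition, e.g. on evaluate_argument(['x ~', 'x'], '~'): A returns False, B raises ValueError; on evaluate_argument([], ''): A raises IndexError, B raises ValueError
import Mathlib
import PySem

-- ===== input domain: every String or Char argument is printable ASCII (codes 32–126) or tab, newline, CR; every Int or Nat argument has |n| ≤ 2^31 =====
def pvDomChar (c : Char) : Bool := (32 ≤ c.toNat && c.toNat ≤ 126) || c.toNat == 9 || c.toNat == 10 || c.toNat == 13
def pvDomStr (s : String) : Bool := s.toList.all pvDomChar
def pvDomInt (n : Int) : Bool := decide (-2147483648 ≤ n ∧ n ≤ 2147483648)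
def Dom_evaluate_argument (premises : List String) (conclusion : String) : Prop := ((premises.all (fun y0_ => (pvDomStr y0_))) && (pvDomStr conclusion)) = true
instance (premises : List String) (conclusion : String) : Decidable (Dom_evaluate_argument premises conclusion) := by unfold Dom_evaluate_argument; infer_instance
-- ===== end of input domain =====

-- B parses each expression once into a tree and enumerates assignments of the operand
-- variables only (A re-runs a stack machine per assignment over ALL tokens, operators included).
-- Note: A's iteration order over Python sets is unspecified; the return value is proved
-- independent of the order chosen, and the port fixes first-insertion order.

-- ===== PORT A =====
def pvOpsA : List String := ["&", "|", "~", "->"]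

-- the lambdas of A's `operators` dict; truth values are kept as Bool (only the
-- truthiness of the ints/bools on Python's stack is ever observed)
def pvApplyA (tok : String) (x y : Bool) : Bool :=
  if tok = "&" then x && y else if tok = "|" then x || y else (!x) || y

-- the token loop of evaluate_expression; stack head = Python stack top; none = IndexError/KeyError
def pvRunA (tv : PySem.Dict String Int) : List String → List Bool → Option (List Bool)
  | [], st => some st
  | tok :: rest, st =>
    if tok ∈ pvOpsA then
      if tok = "~" then
        match st with
        | x :: st' => pvRunA tv rest ((!x) :: st')
        | [] => none
      else
        match st with
        | y :: x :: st' => pvRunA tv rest (pvApplyA tok x y :: st')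
        | _ => none
    else
      match tv.get? tok with
      | some v => pvRunA tv rest ((v != 0) :: st)
      | none => none

-- one expression: run the stack machine, read stack[0] (= bottom = getLast?)
def pvEvalExprA (tv : PySem.Dict String Int) (s : String) : Option Bool :=
  (pvRunA tv (PySem.Str.split₀ s) []).bind List.getLast?

-- evaluate_expression: premises in order (early False), then the conclusion
def pvEvalExpressionA (tv : PySem.Dict String Int) : List String → String → Option Bool
  | [], conclusion => pvEvalExprA tv conclusion
  | p :: rest, conclusion =>
    match pvEvalExprA tv p with
    | none => none
    | some b => if !b then some false else pvEvalExpressionA tv rest conclusion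

-- generate_combinations
def pvGenCombos (vs : List String) : List (List Int) :=
  let n := vs.length
  (PySem.List.pyRange 0 ((2 : Int) ^ n) 1).map (fun i =>
    ((PySem.List.pyRange 0 (n : Int) 1).map (fun j =>
      PySem.Int.mod (PySem.Int.floordiv i ((2 : Int) ^ j.toNat)) 2)).reverse)

-- the `variables` set of evaluate_argument
def pvVarsA (premises : List String) (conclusion : String) : List String :=
  PySem.Set.update
    (premises.foldl (fun s p => PySem.Set.update s (PySem.Set.ofList (PySem.Str.split₀ p)))
      PySem.Set.empty)
    (PySem.Set.ofList (PySem.Str.split₀ conclusion))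

def evaluate_argument (premises : List String) (conclusion : String) : Bool :=
  let vars := pvVarsA premises conclusion
  (pvGenCombos vars).any (fun combo =>
    -- truth_values = dict(zip(variables, combination))
    let tv := (vars.zip combo).foldl (fun d p => d.insert p.1 p.2) PySem.Dict.empty
    -- `if valid: return True`; none = Python raises there (excluded by Pre_)
    pvEvalExpressionA tv premises conclusion == some true)

-- ===== PORT B =====
inductive PTree where
  | var : String → PTree
  | neg : PTree → PTree
  | node : String → PTree → PTree → PTree
deriving DecidableEq, Repr

def pvOpsB : List String := ["&", "|", "~", "->"]

-- _parse's token loop; stack head = Python stack top; none = ValueError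
def pvParseRun : List String → List PTree → Option (List PTree)
  | [], st => some st
  | tok :: rest, st =>
    if tok = "~" then
      match st with
      | t :: st' => pvParseRun rest (PTree.neg t :: st')
      | [] => none
    else if tok ∈ pvOpsB then
      match st with
      | r :: l :: st' => pvParseRun rest (PTree.node tok l r :: st')
      | _ => none
    else pvParseRun rest (PTree.var tok :: st)

-- _parse: run the loop, return stack[0] (bottom = getLast?); none also when the stack is empty
def pvParseB (tokens : List String) : Option PTree :=
  (pvParseRun tokens []).bind List.getLast?

-- _eval; none = KeyError on env (never happens on parsed trees of the named variables)
def pvEvalB (env : PySem.Dict String Bool) : PTree → Option Bool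
  | .var s => env.get? s
  | .neg t => (pvEvalB env t).map (!·)
  | .node op l r =>
    (pvEvalB env l).bind (fun x => (pvEvalB env r).map (fun y =>
      if op = "&" then x && y else if op = "|" then x || y else (!x) || y))

-- _envs
def pvEnvs : List String → List (PySem.Dict String Bool)
  | [] => [PySem.Dict.empty]
  | n :: rest =>
    let es := pvEnvs rest
    ([false, true] : List Bool).flatMap (fun b => es.map (fun e => e.insert n b))

def pvNamesB (exprs : List (List String)) (cexpr : List String) : List String :=
  PySem.List.sorted
    (PySem.Set.ofList ((exprs ++ [cexpr]).flatMap (fun e => e) |>.filter (fun t => !(pvOpsB.contains t))))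
    (fun x => x) false

def evaluate_argument_alt (premises : List String) (conclusion : String) : Bool :=
  let exprs := premises.map PySem.Str.split₀
  let cexpr := PySem.Str.split₀ conclusion
  match exprs.mapM pvParseB, pvParseB cexpr with
  | some trees, some ctree =>
    let names := pvNamesB exprs cexpr
    (pvEnvs names).any (fun env =>
      trees.all (fun t => (pvEvalB env t).getD false) && (pvEvalB env ctree).getD false)
  | _, _ => false  -- a ValueError of _parse; excluded by Pre_

-- ===== PRECONDITION & SPEC =====
-- stack-depth check of one space-split expression: no operator underflow, and at least
-- one value left at the end (where this fails, A raises IndexError — except when the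
-- failing expression is never reached because the premises before it are never jointly
-- true, in which case A returns False while B, which parses everything up front,
-- raises ValueError; Pre_ excludes those inputs too, see claim.json "cites").
def pvDepth : List String → Nat → Option Nat
  | [], d => some d
  | tok :: rest, d =>
    if tok = "~" then (if 1 ≤ d then pvDepth rest d else none)
    else if tok = "&" ∨ tok = "|" ∨ tok = "->" then
      (if 2 ≤ d then pvDepth rest (d - 1) else none)
    else pvDepth rest (d + 1)

def pvWF (toks : List String) : Bool :=
  match pvDepth toks 0 with
  | some d => decide (1 ≤ d)
  | none => false

-- Pre_ excludes inputs where some premise or the conclusion is malformed postfix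
-- (operator underflow or no tokens): there the stack machine of A raises IndexError
-- whenever it reaches that expression, and B's parser raises ValueError.
def Pre_evaluate_argument (premises : List String) (conclusion : String) : Prop :=
  (∀ p ∈ premises, pvWF (PySem.Str.split₀ p) = true) ∧ pvWF (PySem.Str.split₀ conclusion) = true

instance (premises : List String) (conclusion : String) : Decidable (Pre_evaluate_argument premises conclusion) := by
  unfold Pre_evaluate_argument; infer_instance

def pvWitness_evaluate_argument : List String × String := (["p q ->", "p"], "q ~ ~")

def Spec_evaluate_argument (premises : List String) (conclusion : String) (out : Bool) : Prop := out = evaluate_argument_alt premises conclusion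
instance (premises : List String) (conclusion : String) (out : Bool) : Decidable (Spec_evaluate_argument premises conclusion out) := by unfold Spec_evaluate_argument; infer_instance

-- ===== CLAIM (what is proved, stated in full; the proofs are below) =====
def Claim_equal_evaluate_argument : Prop := ∀ (premises : List String) (conclusion : String), Dom_evaluate_argument premises conclusion → Pre_evaluate_argument premises conclusion → Spec_evaluate_argument premises conclusion (evaluate_argument premises conclusion)

-- ===== LEMMAS AND PROOFS =====

-- total tree evaluation under a Boolean assignment (the common semantics)
def evalT (f : String → Bool) : PTree → Bool
  | .var s => f s
  | .neg t => !evalT f t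
  | .node op l r =>
    if op = "&" then evalT f l && evalT f r
    else if op = "|" then evalT f l || evalT f r
    else (!evalT f l) || evalT f r

def leavesT : PTree → List String
  | .var s => [s]
  | .neg t => leavesT t
  | .node _ l r => leavesT l ++ leavesT r

-- the joint-satisfiability predicate both programs decide
def SatT (trees : List PTree) (ctree : PTree) (f : String → Bool) : Prop :=
  trees.all (evalT f) = true ∧ evalT f ctree = true

-- ---------- parsing vs the depth check ----------

lemma pvParseRun_length : ∀ (toks : List String) (st : List PTree),
    (pvParseRun toks st).map List.length = pvDepth toks st.length := by
  intro toks
  induction toks with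
  | nil => intro st; simp [pvParseRun, pvDepth]
  | cons tok rest ih =>
    intro st
    by_cases h1 : tok = "~"
    · subst h1
      cases st with
      | nil => simp [pvParseRun, pvDepth]
      | cons t st' => simpa [pvParseRun, pvDepth] using ih (PTree.neg t :: st')
    · by_cases h2 : tok ∈ pvOpsB
      · have h3 : tok = "&" ∨ tok = "|" ∨ tok = "->" := by
          simp [pvOpsB] at h2; tauto
        match st with
        | [] =>
          simp [pvParseRun, pvDepth, h1, h2, h3]
        | [t] =>
          simp [pvParseRun, pvDepth, h1, h2, h3]
        | r :: l :: st' =>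
          have := ih (PTree.node tok l r :: st')
          simp [pvParseRun, pvDepth, h1, h2, h3, this]
      · have h3 : ¬ (tok = "&" ∨ tok = "|" ∨ tok = "->") := by
          simp [pvOpsB] at h2; tauto
        have := ih (PTree.var tok :: st)
        simp [pvParseRun, pvDepth, h1, h2, h3, this]

lemma pvParseB_isSome_of_wf (toks : List String) (h : pvWF toks = true) :
    ∃ t, pvParseB toks = some t := by
  unfold pvWF at h
  have hlen := pvParseRun_length toks []
  unfold pvParseB
  rcases hd : pvDepth toks 0 with _ | d
  · rw [hd] at h; simp at h
  · rw [hd] at h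
    simp only [List.length_nil] at hlen
    rw [hd] at hlen
    rcases hrun : pvParseRun toks [] with _ | st
    · rw [hrun] at hlen; simp at hlen
    · rw [hrun] at hlen
      simp at hlen h
      have hne : st ≠ [] := by
        intro hnil; subst hnil; simp at hlen; omega
      refine ⟨st.getLast hne, ?_⟩
      simp [List.getLast?_eq_some_getLast hne]

-- ---------- A's stack machine runs the parse trees ----------

lemma pvRunA_eq_parse (tv : PySem.Dict String Int) (f : String → Bool) :
    ∀ (toks : List String) (st : List PTree),
    (∀ tok ∈ toks, tok ∉ pvOpsA → ∃ v, tv.get? tok = some v ∧ (v != 0) = f tok) →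
    pvRunA tv toks (st.map (evalT f)) = (pvParseRun toks st).map (List.map (evalT f)) := by
  intro toks
  induction toks with
  | nil => intro st h; simp [pvRunA, pvParseRun]
  | cons tok rest ih =>
    intro st h
    have hrest : ∀ tok' ∈ rest, tok' ∉ pvOpsA → ∃ v, tv.get? tok' = some v ∧ (v != 0) = f tok' :=
      fun t ht => h t (List.mem_cons_of_mem _ ht)
    by_cases h1 : tok = "~"
    · subst h1
      have hmem : ("~" : String) ∈ pvOpsA := by simp [pvOpsA]
      cases st with
      | nil => simp [pvRunA, pvParseRun, hmem]
      | cons t st' =>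
        have := ih (PTree.neg t :: st') hrest
        simp only [List.map_cons, evalT] at this ⊢
        simpa [pvRunA, pvParseRun, hmem] using this
    · by_cases h2 : tok ∈ pvOpsA
      · have h2b : tok ∈ pvOpsB := h2
        match st with
        | [] => simp [pvRunA, pvParseRun, h1, h2, h2b]
        | [t] => simp [pvRunA, pvParseRun, h1, h2, h2b]
        | r :: l :: st' =>
          have := ih (PTree.node tok l r :: st') hrest
          simp only [List.map_cons, evalT] at this ⊢
          simp only [pvRunA, pvParseRun, h1, h2, h2b, if_pos]
          simp [pvApplyA] at this ⊢
          convert this using 2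
      · have h2b : tok ∉ pvOpsB := h2
        obtain ⟨v, hv, hveq⟩ := h tok (List.mem_cons_self) h2
        have := ih (PTree.var tok :: st) hrest
        simp only [List.map_cons, evalT] at this
        rw [← hveq] at this
        simp [pvRunA, pvParseRun, h1, h2, h2b, hv, this]

lemma pvEvalExprA_eq (tv : PySem.Dict String Int) (f : String → Bool) (s : String)
    (h : ∀ tok ∈ PySem.Str.split₀ s, tok ∉ pvOpsA → ∃ v, tv.get? tok = some v ∧ (v != 0) = f tok) :
    pvEvalExprA tv s = (pvParseB (PySem.Str.split₀ s)).map (evalT f) := by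
  unfold pvEvalExprA pvParseB
  have := pvRunA_eq_parse tv f (PySem.Str.split₀ s) [] h
  simp only [List.map_nil] at this
  rw [this]
  rcases pvParseRun (PySem.Str.split₀ s) [] with _ | st
  · simp
  · simp [List.getLast?_map]

-- the premise chain
lemma pvEvalExpressionA_eq (tv : PySem.Dict String Int) (f : String → Bool) :
    ∀ (premises : List String) (trees : List PTree) (conclusion : String) (ctree : PTree),
    List.Forall₂ (fun p t => pvParseB (PySem.Str.split₀ p) = some t) premises trees →
    pvParseB (PySem.Str.split₀ conclusion) = some ctree →
    (∀ p ∈ premises, ∀ tok ∈ PySem.Str.split₀ p, tok ∉ pvOpsA →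
      ∃ v, tv.get? tok = some v ∧ (v != 0) = f tok) →
    (∀ tok ∈ PySem.Str.split₀ conclusion, tok ∉ pvOpsA →
      ∃ v, tv.get? tok = some v ∧ (v != 0) = f tok) →
    pvEvalExpressionA tv premises conclusion = some (trees.all (evalT f) && evalT f ctree) := by
  intro premises trees conclusion ctree hts hc hp hcl
  induction hts with
  | nil =>
    have := pvEvalExprA_eq tv f conclusion hcl
    simp [pvEvalExpressionA, this, hc]
  | @cons p t prems ts hpt htail ih =>
    have hp1 := pvEvalExprA_eq tv f p (hp p (List.mem_cons_self))
    have ih' := ih (fun q hq => hp q (List.mem_cons_of_mem _ hq))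
    simp only [pvEvalExpressionA, hp1, hpt, Option.map_some]
    cases het : evalT f t with
    | false => simp [het]
    | true => simp [het, ih']

-- ---------- the variables set of A ----------

lemma mem_pvVarsA_fold (premises : List String) :
    ∀ (s0 : PySem.Set String) (x : String),
    x ∈ premises.foldl (fun s p => PySem.Set.update s (PySem.Set.ofList (PySem.Str.split₀ p))) s0 ↔
      x ∈ s0 ∨ ∃ p ∈ premises, x ∈ PySem.Str.split₀ p := by
  induction premises with
  | nil => simp
  | cons p rest ih =>
    intro s0 x
    simp only [List.foldl_cons, ih, PySem.Set.mem_update, PySem.Set.mem_ofList]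
    constructor
    · rintro (( h | h) | ⟨q, hq, hx⟩)
      · exact Or.inl h
      · exact Or.inr ⟨p, List.mem_cons_self, h⟩
      · exact Or.inr ⟨q, List.mem_cons_of_mem _ hq, hx⟩
    · rintro (h | ⟨q, hq, hx⟩)
      · exact Or.inl (Or.inl h)
      · rcases List.mem_cons.mp hq with rfl | hq'
        · exact Or.inl (Or.inr hx)
        · exact Or.inr ⟨q, hq', hx⟩

lemma mem_pvVarsA_of_premise {premises : List String} {conclusion : String} {p tok : String}
    (hp : p ∈ premises) (ht : tok ∈ PySem.Str.split₀ p) :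
    tok ∈ pvVarsA premises conclusion := by
  unfold pvVarsA
  rw [PySem.Set.mem_update, mem_pvVarsA_fold]
  exact Or.inl (Or.inr ⟨p, hp, ht⟩)

lemma mem_pvVarsA_of_conclusion {premises : List String} {conclusion : String} {tok : String}
    (ht : tok ∈ PySem.Str.split₀ conclusion) :
    tok ∈ pvVarsA premises conclusion := by
  unfold pvVarsA
  rw [PySem.Set.mem_update, PySem.Set.mem_ofList]
  exact Or.inr ht

lemma nodup_pvVarsA (premises : List String) (conclusion : String) :
    (pvVarsA premises conclusion).Nodup := by
  unfold pvVarsA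
  apply PySem.Set.nodup_update
  have : ∀ (s0 : PySem.Set String), s0.Nodup →
      (premises.foldl (fun s p => PySem.Set.update s (PySem.Set.ofList (PySem.Str.split₀ p))) s0).Nodup := by
    induction premises with
    | nil => intro s0 h; exact h
    | cons p rest ih =>
      intro s0 h
      exact ih _ (PySem.Set.nodup_update _ _ h)
  exact this _ List.nodup_nil

-- ---------- the zip dict ----------

lemma zipDict_get? (ks : List String) (g : String → Int) (hnd : ks.Nodup) :
    ∀ k ∈ ks,
      ((ks.zip (ks.map g)).foldl (fun d p => d.insert p.1 p.2)
        (PySem.Dict.empty : PySem.Dict String Int)).get? k = some (g k) := by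
  intro k hk
  have hzip : ks.zip (ks.map g) = ks.map (fun x => (x, g x)) := by
    have := @List.zip_map' String String Int id g ks
    simpa using this
  have hitems := PySem.Dict.items_foldl_insert_fresh (ks.zip (ks.map g)) Prod.fst Prod.snd
      (PySem.Dict.empty : PySem.Dict String Int)
      (by intro a _; simp [PySem.Dict.contains_empty])
      (by rw [hzip]; simpa [List.map_map, Function.comp_def] using hnd)
  have hkeysnd := PySem.Dict.nodup_keys_foldl_insert_key (ks.zip (ks.map g)) Prod.fst
      (fun _ x => x.2) (PySem.Dict.empty : PySem.Dict String Int) PySem.Dict.nodup_keys_empty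
  apply PySem.Dict.get?_of_mem_items _ _ hkeysnd
  · rw [hitems, hzip]
    refine List.mem_append_right _ ?_
    simp only [List.map_map]
    exact List.mem_map.mpr ⟨k, hk, rfl⟩

-- ---------- combinations reach every bit vector ----------

def encB : List Int → Int
  | [] => 0
  | b :: bs => b * 2 ^ bs.length + encB bs

lemma encB_bounds : ∀ bs : List Int, (∀ b ∈ bs, b = 0 ∨ b = 1) →
    0 ≤ encB bs ∧ encB bs < 2 ^ bs.length := by
  intro bs
  induction bs with
  | nil => intro _; simp [encB]
  | cons b bs ih =>
    intro h
    have hb : b = 0 ∨ b = 1 := h b (List.mem_cons_self)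
    have ⟨h0, h1⟩ := ih (fun x hx => h x (List.mem_cons_of_mem _ hx))
    have hp : (0 : Int) < 2 ^ bs.length := by positivity
    simp only [encB, List.length_cons, pow_succ]
    rcases hb with rfl | rfl <;> constructor <;> nlinarith

lemma bits_encB : ∀ bs : List Int, (∀ b ∈ bs, b = 0 ∨ b = 1) →
    ((List.range bs.length).map (fun j =>
      PySem.Int.mod (PySem.Int.floordiv (encB bs) ((2 : Int) ^ j)) 2)).reverse = bs := by
  intro bs
  induction bs with
  | nil => intro _; simp
  | cons b bs ih =>
    intro h
    have hb : b = 0 ∨ b = 1 := h b (List.mem_cons_self)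
    have hrest := fun x hx => h x (List.mem_cons_of_mem _ hx)
    obtain ⟨h0, h1⟩ := encB_bounds bs hrest
    set m := bs.length with hm
    set e := encB bs with he
    have hi : encB (b :: bs) = e + b * 2 ^ m := by simp [encB, ← he, ← hm]; ring
    have hpm : (0 : Int) < 2 ^ m := by positivity
    -- top bit
    have htop : PySem.Int.mod (PySem.Int.floordiv (encB (b :: bs)) ((2 : Int) ^ m)) 2 = b := by
      rw [hi, PySem.Int.floordiv_eq_ediv_of_pos hpm, PySem.Int.mod_eq_emod_of_pos (by norm_num)]
      rw [Int.add_mul_ediv_right _ _ (ne_of_gt hpm), Int.ediv_eq_zero_of_lt h0 h1]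
      rcases hb with rfl | rfl <;> decide
    -- lower bits unchanged
    have hlow : ∀ j < m, PySem.Int.mod (PySem.Int.floordiv (encB (b :: bs)) ((2 : Int) ^ j)) 2
        = PySem.Int.mod (PySem.Int.floordiv e ((2 : Int) ^ j)) 2 := by
      intro j hj
      have hpj : (0 : Int) < 2 ^ j := by positivity
      rw [hi, PySem.Int.floordiv_eq_ediv_of_pos hpj, PySem.Int.floordiv_eq_ediv_of_pos hpj,
        PySem.Int.mod_eq_emod_of_pos (by norm_num), PySem.Int.mod_eq_emod_of_pos (by norm_num)]
      obtain ⟨k, hk⟩ : ∃ k, m = k + 1 + j := ⟨m - 1 - j, by omega⟩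
      have hsplit : b * 2 ^ m = (2 * (b * 2 ^ k)) * 2 ^ j := by
        rw [hk, pow_add, pow_add]; ring
      rw [hsplit, Int.add_mul_ediv_right _ _ (ne_of_gt hpj)]
      omega
    simp only [List.length_cons, List.range_succ, List.map_append, List.map_cons, List.map_nil,
      List.reverse_append, List.reverse_cons, List.reverse_nil, List.nil_append, List.cons_append]
    rw [htop]
    congr 1
    rw [List.map_congr_left (fun j hj => hlow j (List.mem_range.mp hj))]
    exact ih hrest

lemma mem_pvGenCombos (vars : List String) (bs : List Int)
    (hb : ∀ b ∈ bs, b = 0 ∨ b = 1) (hl : bs.length = vars.length) :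
    bs ∈ pvGenCombos vars := by
  unfold pvGenCombos
  obtain ⟨h0, h1⟩ := encB_bounds bs hb
  refine List.mem_map.mpr ⟨encB bs, ?_, ?_⟩
  · rw [PySem.List.mem_pyRange_one]
    exact ⟨h0, by rw [← hl]; exact_mod_cast h1⟩
  · rw [← hl, PySem.List.pyRange_zero_natCast, List.map_map]
    have hcongr : ((List.range bs.length).map
        ((fun j => PySem.Int.mod (PySem.Int.floordiv (encB bs) ((2:Int) ^ j.toNat)) 2) ∘ (fun k : Nat => (k : Int))))
        = (List.range bs.length).map (fun j =>
            PySem.Int.mod (PySem.Int.floordiv (encB bs) ((2:Int) ^ j)) 2) := by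
      apply List.map_congr_left
      intro j _
      simp
    rw [hcongr]
    exact bits_encB bs hb

-- ---------- B's environments ----------

lemma pvEnvs_get? : ∀ (names : List String) (env : PySem.Dict String Bool),
    env ∈ pvEnvs names → ∀ v ∈ names, ∃ b, env.get? v = some b := by
  intro names
  induction names with
  | nil => simp
  | cons n rest ih =>
    intro env henv v hv
    simp only [pvEnvs, List.mem_flatMap, List.mem_map] at henv
    obtain ⟨b, _, e, he, rfl⟩ := henv
    rcases List.mem_cons.mp hv with rfl | hv'
    · exact ⟨b, PySem.Dict.get?_insert_self e v b⟩
    · by_cases hvn : v = n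
      · subst hvn; exact ⟨b, PySem.Dict.get?_insert_self e v b⟩
      · obtain ⟨b', hb'⟩ := ih e he v hv'
        exact ⟨b', by rw [PySem.Dict.get?_insert_of_ne e b hvn, hb']⟩

lemma pvEnvs_surj : ∀ (names : List String) (g : String → Bool),
    ∃ env ∈ pvEnvs names, ∀ v ∈ names, env.get? v = some (g v) := by
  intro names
  induction names with
  | nil => intro g; exact ⟨PySem.Dict.empty, by simp [pvEnvs], by simp⟩
  | cons n rest ih =>
    intro g
    obtain ⟨e, he, hget⟩ := ih g
    refine ⟨e.insert n (g n), ?_, ?_⟩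
    · simp only [pvEnvs, List.mem_flatMap, List.mem_map]
      exact ⟨g n, by cases g n <;> simp, e, he, rfl⟩
    · intro v hv
      by_cases hvn : v = n
      · subst hvn; exact PySem.Dict.get?_insert_self e v (g v)
      · rw [PySem.Dict.get?_insert_of_ne e (g n) hvn]
        exact hget v ((List.mem_cons.mp hv).resolve_left hvn)

lemma pvEvalB_eq (env : PySem.Dict String Bool) (f : String → Bool) :
    ∀ t : PTree, (∀ v ∈ leavesT t, env.get? v = some (f v)) →
    pvEvalB env t = some (evalT f t) := by
  intro t
  induction t with
  | var s => intro h; exact h s (by simp [leavesT])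
  | neg t ih =>
    intro h
    have := ih (fun v hv => h v (by simpa [leavesT] using hv))
    simp [pvEvalB, evalT, this]
  | node op l r ihl ihr =>
    intro h
    have hl := ihl (fun v hv => h v (by simp [leavesT]; exact Or.inl hv))
    have hr := ihr (fun v hv => h v (by simp [leavesT]; exact Or.inr hv))
    simp [pvEvalB, evalT, hl, hr]

-- leaves of parsed trees are non-operator tokens
lemma pvParseRun_leaves : ∀ (toks : List String) (st st' : List PTree),
    pvParseRun toks st = some st' →
    ∀ t ∈ st', ∀ v ∈ leavesT t,
      (∃ u ∈ st, v ∈ leavesT u) ∨ (v ∈ toks ∧ v ∉ pvOpsB) := by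
  intro toks
  induction toks with
  | nil =>
    intro st st' hrun t ht v hv
    simp only [pvParseRun, Option.some.injEq] at hrun
    subst hrun
    exact Or.inl ⟨t, ht, hv⟩
  | cons tok rest ih =>
    intro st st' hrun t ht v hv
    have lift : (∃ u ∈ st, v ∈ leavesT u) ∨ (v ∈ rest ∧ v ∉ pvOpsB) →
        (∃ u ∈ st, v ∈ leavesT u) ∨ (v ∈ tok :: rest ∧ v ∉ pvOpsB) := by
      rintro (h | ⟨h1, h2⟩)
      · exact Or.inl h
      · exact Or.inr ⟨List.mem_cons_of_mem _ h1, h2⟩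
    by_cases h1 : tok = "~"
    · subst h1
      cases st with
      | nil => simp [pvParseRun] at hrun
      | cons u st0 =>
        simp only [pvParseRun, if_pos] at hrun
        rcases ih _ _ hrun t ht v hv with ⟨w, hw, hvw⟩ | h
        · rcases List.mem_cons.mp hw with rfl | hw'
          · exact Or.inl ⟨u, List.mem_cons_self, by simpa [leavesT] using hvw⟩
          · exact Or.inl ⟨w, List.mem_cons_of_mem _ hw', hvw⟩
        · exact lift (Or.inr h)
    · by_cases h2 : tok ∈ pvOpsB
      · match st with
        | [] => simp [pvParseRun, h1, h2] at hrun
        | [u] => simp [pvParseRun, h1, h2] at hrun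
        | r :: l :: st0 =>
          simp only [pvParseRun, if_neg h1, if_pos h2] at hrun
          rcases ih _ _ hrun t ht v hv with ⟨w, hw, hvw⟩ | h
          · rcases List.mem_cons.mp hw with rfl | hw'
            · simp only [leavesT, List.mem_append] at hvw
              rcases hvw with hvl | hvr
              · exact Or.inl ⟨l, by simp, hvl⟩
              · exact Or.inl ⟨r, by simp, hvr⟩
            · exact Or.inl ⟨w, List.mem_cons_of_mem _ (List.mem_cons_of_mem _ hw'), hvw⟩
          · exact lift (Or.inr h)
      · simp only [pvParseRun, if_neg h1, if_neg h2] at hrun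
        rcases ih _ _ hrun t ht v hv with ⟨w, hw, hvw⟩ | h
        · rcases List.mem_cons.mp hw with rfl | hw'
          · simp only [leavesT, List.mem_singleton] at hvw
            subst hvw
            exact Or.inr ⟨List.mem_cons_self, h2⟩
          · exact Or.inl ⟨w, hw', hvw⟩
        · exact lift (Or.inr h)

lemma mem_pvNamesB {exprs : List (List String)} {cexpr : List String} {v : String} :
    v ∈ pvNamesB exprs cexpr ↔ (∃ e ∈ exprs ++ [cexpr], v ∈ e) ∧ v ∉ pvOpsB := by
  unfold pvNamesB
  rw [(PySem.List.sorted_perm _ _ _).mem_iff, PySem.Set.mem_ofList, List.mem_filter]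
  have hcontains : ∀ t : String, (!pvOpsB.contains t) = true ↔ t ∉ pvOpsB := by
    intro t; simp
  simp only [List.mem_flatMap, List.mem_append, List.mem_singleton, hcontains]

lemma length_of_mem_pvGenCombos {vars : List String} {combo : List Int}
    (h : combo ∈ pvGenCombos vars) : combo.length = vars.length := by
  unfold pvGenCombos at h
  obtain ⟨i, _, rfl⟩ := List.mem_map.mp h
  simp [PySem.List.pyRange_zero_natCast]

lemma forall₂_exists (premises : List String)
    (hp : ∀ p ∈ premises, pvWF (PySem.Str.split₀ p) = true) :
    ∃ trees, List.Forall₂ (fun p t => pvParseB (PySem.Str.split₀ p) = some t) premises trees := by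
  induction premises with
  | nil => exact ⟨[], List.Forall₂.nil⟩
  | cons p rest ih =>
    obtain ⟨t, ht⟩ := pvParseB_isSome_of_wf _ (hp p (List.mem_cons_self))
    obtain ⟨ts, hts⟩ := ih (fun q hq => hp q (List.mem_cons_of_mem _ hq))
    exact ⟨t :: ts, List.Forall₂.cons ht hts⟩

-- ---------- the two characterizations ----------

-- lookup in dict(zip(ks, vs)) is defined for every key of ks
lemma zipDict_get?_isSome (ks : List String) (vs : List Int) (hnd : ks.Nodup)
    (hl : vs.length = ks.length) :
    ∀ k ∈ ks, ∃ v, ((ks.zip vs).foldl (fun d p => d.insert p.1 p.2)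
      (PySem.Dict.empty : PySem.Dict String Int)).get? k = some v := by
  intro k hk
  have hfst : (ks.zip vs).map Prod.fst = ks := List.map_fst_zip (by omega)
  have hitems := PySem.Dict.items_foldl_insert_fresh (ks.zip vs) Prod.fst Prod.snd
      (PySem.Dict.empty : PySem.Dict String Int)
      (by intro a _; simp [PySem.Dict.contains_empty])
      (by rw [hfst]; exact hnd)
  have hkeysnd := PySem.Dict.nodup_keys_foldl_insert_key (ks.zip vs) Prod.fst
      (fun _ x => x.2) (PySem.Dict.empty : PySem.Dict String Int) PySem.Dict.nodup_keys_empty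
  obtain ⟨i, hi, hik⟩ := List.mem_iff_getElem.mp hk
  have hiz : i < (ks.zip vs).length := by
    rw [List.length_zip]; omega
  refine ⟨vs[i]'(by omega), ?_⟩
  apply PySem.Dict.get?_of_mem_items _ _ hkeysnd
  rw [hitems]
  refine List.mem_append_right _ ?_
  have : (ks.zip vs)[i] = (ks[i]'hi, vs[i]'(by omega)) := List.getElem_zip ..
  have hmem := List.getElem_mem hiz
  rw [this, hik] at hmem
  simpa using hmem

-- each tree of a Forall₂ parse relation comes from some premise
lemma forall₂_mem_right {premises : List String} {trees : List PTree}
    (h : List.Forall₂ (fun p t => pvParseB (PySem.Str.split₀ p) = some t) premises trees) :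
    ∀ t ∈ trees, ∃ p ∈ premises, pvParseB (PySem.Str.split₀ p) = some t := by
  induction h with
  | nil => simp
  | cons hpt htail ih =>
    intro t ht
    rcases List.mem_cons.mp ht with rfl | ht'
    · exact ⟨_, List.mem_cons_self, hpt⟩
    · obtain ⟨p, hp, hpt'⟩ := ih t ht'
      exact ⟨p, List.mem_cons_of_mem _ hp, hpt'⟩

lemma mapM_of_forall₂ {premises : List String} {trees : List PTree}
    (h : List.Forall₂ (fun p t => pvParseB (PySem.Str.split₀ p) = some t) premises trees) :
    (premises.map PySem.Str.split₀).mapM pvParseB = some trees := by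
  induction h with
  | nil => rfl
  | cons hpt htail ih => simp [List.mapM_cons, hpt, ih]

-- the leaves of a tree parsed from toks are non-operator tokens of toks
lemma leaves_pvParseB {toks : List String} {t : PTree} (h : pvParseB toks = some t) :
    ∀ v ∈ leavesT t, v ∈ toks ∧ v ∉ pvOpsB := by
  intro v hv
  unfold pvParseB at h
  rcases hrun : pvParseRun toks [] with _ | st
  · rw [hrun] at h; simp at h
  · rw [hrun] at h
    simp only [Option.bind_some] at h
    have ht : t ∈ st := List.mem_of_getLast? h
    rcases pvParseRun_leaves toks [] st hrun t ht v hv with ⟨u, hu, _⟩ | hgood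
    · simp at hu
    · exact hgood

lemma evaluate_argument_iff (premises : List String) (conclusion : String)
    (trees : List PTree) (ctree : PTree)
    (hts : List.Forall₂ (fun p t => pvParseB (PySem.Str.split₀ p) = some t) premises trees)
    (hc : pvParseB (PySem.Str.split₀ conclusion) = some ctree) :
    evaluate_argument premises conclusion = true ↔ ∃ f, SatT trees ctree f := by
  have hnd := nodup_pvVarsA premises conclusion
  simp only [evaluate_argument, List.any_eq_true, beq_iff_eq]
  constructor
  · rintro ⟨combo, hcombo, hpred⟩
    have hlen : combo.length = (pvVarsA premises conclusion).length :=
      length_of_mem_pvGenCombos hcombo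
    set tv := (((pvVarsA premises conclusion).zip combo).foldl (fun d p => d.insert p.1 p.2)
      (PySem.Dict.empty : PySem.Dict String Int)) with htv
    set f : String → Bool := fun s => (tv.get? s).getD 0 != 0 with hf
    have hlook : ∀ tok, tok ∈ pvVarsA premises conclusion →
        ∃ v, tv.get? tok = some v ∧ (v != 0) = f tok := by
      intro tok htok
      obtain ⟨v, hv⟩ := zipDict_get?_isSome _ combo hnd hlen tok htok
      exact ⟨v, hv, by rw [hf]; show (v != 0) = ((tv.get? tok).getD 0 != 0); rw [htv, hv]; rfl⟩
    have heval := pvEvalExpressionA_eq tv f premises trees conclusion ctree hts hc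
      (fun p hp tok htok _ => hlook tok (mem_pvVarsA_of_premise hp htok))
      (fun tok htok _ => hlook tok (mem_pvVarsA_of_conclusion htok))
    rw [heval] at hpred
    simp only [Option.some.injEq, Bool.and_eq_true] at hpred
    exact ⟨f, hpred.1, hpred.2⟩
  · rintro ⟨f, hall, hconc⟩
    set g : String → Int := fun v => if f v then 1 else 0 with hg
    set bs := (pvVarsA premises conclusion).map g with hbs
    refine ⟨bs, mem_pvGenCombos _ bs ?_ (by simp [hbs]), ?_⟩
    · intro b hb
      obtain ⟨v, _, rfl⟩ := List.mem_map.mp hb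
      by_cases hfv : f v <;> simp [hg, hfv]
    · have hget := zipDict_get? (pvVarsA premises conclusion) g hnd
      have hlook : ∀ tok, tok ∈ pvVarsA premises conclusion →
          ∃ v, (((pvVarsA premises conclusion).zip bs).foldl (fun d p => d.insert p.1 p.2)
            (PySem.Dict.empty : PySem.Dict String Int)).get? tok = some v ∧ (v != 0) = f tok := by
        intro tok htok
        refine ⟨g tok, hget tok htok, ?_⟩
        by_cases hfv : f tok <;> simp [hg, hfv]
      rw [pvEvalExpressionA_eq _ f premises trees conclusion ctree hts hc
        (fun p hp tok htok _ => hlook tok (mem_pvVarsA_of_premise hp htok))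
        (fun tok htok _ => hlook tok (mem_pvVarsA_of_conclusion htok))]
      simp [hall, hconc]

lemma evaluate_argument_alt_iff (premises : List String) (conclusion : String)
    (trees : List PTree) (ctree : PTree)
    (hts : List.Forall₂ (fun p t => pvParseB (PySem.Str.split₀ p) = some t) premises trees)
    (hc : pvParseB (PySem.Str.split₀ conclusion) = some ctree) :
    evaluate_argument_alt premises conclusion = true ↔ ∃ f, SatT trees ctree f := by
  have hmapM := mapM_of_forall₂ hts
  simp only [evaluate_argument_alt, hmapM, hc, List.any_eq_true]
  set exprs := premises.map PySem.Str.split₀ with hexprs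
  set cexpr := PySem.Str.split₀ conclusion with hcexpr
  have hleaves : ∀ t ∈ trees, ∀ v ∈ leavesT t, v ∈ pvNamesB exprs cexpr := by
    intro t ht v hv
    obtain ⟨p, hp, hparse⟩ := forall₂_mem_right hts t ht
    obtain ⟨hvtok, hvop⟩ := leaves_pvParseB hparse v hv
    exact mem_pvNamesB.mpr ⟨⟨PySem.Str.split₀ p,
      List.mem_append_left _ (List.mem_map.mpr ⟨p, hp, rfl⟩), hvtok⟩, hvop⟩
  have hcleaves : ∀ v ∈ leavesT ctree, v ∈ pvNamesB exprs cexpr := by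
    intro v hv
    obtain ⟨hvtok, hvop⟩ := leaves_pvParseB hc v hv
    exact mem_pvNamesB.mpr ⟨⟨cexpr, List.mem_append_right _ (List.mem_singleton.mpr rfl), hvtok⟩, hvop⟩
  constructor
  · rintro ⟨env, henv, hpred⟩
    set f : String → Bool := fun s => (env.get? s).getD false with hf
    have hcov : ∀ v, v ∈ pvNamesB exprs cexpr → env.get? v = some (f v) := by
      intro v hv
      obtain ⟨b, hb⟩ := pvEnvs_get? _ env henv v hv
      simp [hf, hb]
    simp only [Bool.and_eq_true, List.all_eq_true] at hpred
    obtain ⟨hallp, hconcp⟩ := hpred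
    refine ⟨f, List.all_eq_true.mpr ?_, ?_⟩
    · intro t ht
      have := hallp t ht
      rwa [pvEvalB_eq env f t (fun v hv => hcov v (hleaves t ht v hv))] at this
    · have := hconcp
      rwa [pvEvalB_eq env f ctree (fun v hv => hcov v (hcleaves v hv))] at this
  · rintro ⟨f, hall, hconc⟩
    obtain ⟨env, henv, hget⟩ := pvEnvs_surj (pvNamesB exprs cexpr) f
    refine ⟨env, henv, ?_⟩
    simp only [Bool.and_eq_true, List.all_eq_true]
    constructor
    · intro t ht
      rw [pvEvalB_eq env f t (fun v hv => hget v (hleaves t ht v hv))]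
      exact List.all_eq_true.mp hall t ht
    · rw [pvEvalB_eq env f ctree (fun v hv => hget v (hcleaves v hv))]
      simpa using hconc

-- ===== VERDICT (by name: the statement is the Claim_ definition above) =====
theorem evaluate_argument_spec : Claim_equal_evaluate_argument := by
  intro premises conclusion _hdom hpre
  unfold Spec_evaluate_argument
  obtain ⟨hp, hcw⟩ := hpre
  have hc := pvParseB_isSome_of_wf _ hcw
  obtain ⟨ctree, hc⟩ := hc
  obtain ⟨trees, hts⟩ := forall₂_exists premises hp
  have h1 := evaluate_argument_iff premises conclusion trees ctree hts hc
  have h2 := evaluate_argument_alt_iff premises conclusion trees ctree hts hc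
  cases ha : evaluate_argument premises conclusion <;>
    cases hb : evaluate_argument_alt premises conclusion <;> simp_all
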